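-- pv_equiv track=rewrite | github.com/NYXBAM/OsintRat | utils/helper.py | encode_ref_id
-- ===== SOURCE A (Python) =====
-- import string
--
-- ALPHABET = string.digits + string.ascii_letters  # 0-9A-Za-z
--
-- BASE = len(ALPHABET)
--
-- def encode_ref_id(num: int) -> str:
--     """Encode integer telegram_id to short base62 string."""
--     if num == 0:
--         return ALPHABET[0]
--     encoded = ""
--     while num > 0:
--         num, rem = divmod(num, BASE)
--         encoded = ALPHABET[rem] + encoded
--     return encoded
-- ===== SOURCE B (Python) =====
-- import string
--
-- ALPHABET = string.digits + string.ascii_letters  # 0-9A-Za-z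
--
-- BASE = len(ALPHABET)
--
-- def encode_ref_id(num: int) -> str:
--     """Encode integer telegram_id to short base62 string (most-significant digit first)."""
--     if num <= 0:
--         return ALPHABET[0] if num == 0 else ""
--     # largest power of BASE not exceeding num
--     p = 1
--     while p * BASE <= num:
--         p *= BASE
--     # peel digits from the most significant end
--     out = []
--     while p > 0:
--         q, num = divmod(num, p)
--         out.append(ALPHABET[q])
--         p //= BASE
--     return "".join(out)
-- ===== Notes on version B (the rewrite author's own statement) =====
-- stated objective: alternative
-- what changed: Replaces the LSB-first divmod loop with string prepends by an MSB-first algorithm: first find the largest power of BASE not exceeding num, then peel digits from the most significant end into a list and join once.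
import Mathlib
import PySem

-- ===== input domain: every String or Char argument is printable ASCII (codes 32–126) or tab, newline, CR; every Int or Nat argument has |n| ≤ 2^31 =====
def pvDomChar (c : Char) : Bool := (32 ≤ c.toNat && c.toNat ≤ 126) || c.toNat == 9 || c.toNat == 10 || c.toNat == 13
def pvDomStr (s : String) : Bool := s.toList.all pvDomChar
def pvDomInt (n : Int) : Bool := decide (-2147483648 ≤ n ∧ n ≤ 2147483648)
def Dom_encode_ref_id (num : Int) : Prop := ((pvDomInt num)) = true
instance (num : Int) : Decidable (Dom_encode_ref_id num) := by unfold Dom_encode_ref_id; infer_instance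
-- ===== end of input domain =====

-- B replaces A's LSB-first divmod loop with string prepends by an MSB-first algorithm:
-- find the largest power of the base not exceeding num, then peel digits from the most
-- significant end into a list and join once (objective: alternative, no speed claim).

-- ALPHABET = string.digits + string.ascii_letters, shared module constant of both programs
def pvALPHABET : List Char := "0123456789abcdefghijklmnopqrstuvwxyzABCDEFGHIJKLMNOPQRSTUVWXYZ".toList

-- ALPHABET[i]; exact for 0 ≤ i < 62, the only indices either program uses
def pvDigit (i : Int) : String := ((PySem.List.pyGet? pvALPHABET i).getD ' ').toString

-- ===== PORT A =====
-- the 'while num > 0' loop of A, prepending ALPHABET[rem] to the accumulator 'encoded'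
def encLoopA (num : Int) (encoded : String) : String :=
  if _h : 0 < num then
    encLoopA (PySem.Int.floordiv num 62) (pvDigit (PySem.Int.mod num 62) ++ encoded)
  else encoded
termination_by num.toNat
decreasing_by
  have := PySem.Int.floordiv_eq_ediv_of_pos (a := num) (b := 62) (by omega)
  rw [this]; omega

def encode_ref_id (num : Int) : String :=
  if num = 0 then pvDigit 0
  else encLoopA num ""

-- ===== PORT B =====
-- 'while p * BASE <= num: p *= BASE'. The '0 < p' conjunct is a termination guard only:
-- B always starts this loop at p = 1 and only multiplies by 62, so p is always positive.
def powLoopB (p num : Int) : Int :=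
  if _h : 0 < p ∧ p * 62 ≤ num then powLoopB (p * 62) num else p
termination_by (num - p).toNat
decreasing_by omega

-- 'while p > 0: q, num = divmod(num, p); out.append(ALPHABET[q]); p //= BASE'
def digLoopB (p num : Int) (out : List String) : List String :=
  if _h : 0 < p then
    digLoopB (PySem.Int.floordiv p 62) (PySem.Int.mod num p)
      (out ++ [pvDigit (PySem.Int.floordiv num p)])
  else out
termination_by p.toNat
decreasing_by
  have := PySem.Int.floordiv_eq_ediv_of_pos (a := p) (b := 62) (by omega)
  rw [this]; omega

def encode_ref_id_alt (num : Int) : String :=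
  if num ≤ 0 then (if num = 0 then pvDigit 0 else "")
  else String.join (digLoopB (powLoopB 1 num) num [])

-- ===== PRECONDITION & SPEC =====
def Spec_encode_ref_id (num : Int) (out : String) : Prop := out = encode_ref_id_alt num
instance (num : Int) (out : String) : Decidable (Spec_encode_ref_id num out) := by unfold Spec_encode_ref_id; infer_instance

-- ===== CLAIM (what is proved, stated in full; the proofs are below) =====
def Claim_equal_encode_ref_id : Prop := ∀ (num : Int), Dom_encode_ref_id num → Spec_encode_ref_id num (encode_ref_id num)

-- ===== LEMMAS AND PROOFS =====

-- canonical LSB-first recursion, proof-only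
def repA (n : Int) : String :=
  if _h : n ≤ 0 then ""
  else repA (PySem.Int.floordiv n 62) ++ pvDigit (PySem.Int.mod n 62)
termination_by n.toNat
decreasing_by
  have := PySem.Int.floordiv_eq_ediv_of_pos (a := n) (b := 62) (by omega)
  rw [this]; omega

-- the (k+1)-digit zero-padded base-62 rendering of m, MSB-recursive
def padM : Nat → Nat → String
  | 0, m => pvDigit (m : Int)
  | (k+1), m => pvDigit ((m / 62^(k+1) : Nat) : Int) ++ padM k (m % 62^(k+1))

theorem join_acc (l : List String) (a : String) : (l.foldl (·++·) a) = a ++ String.join l := by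
  induction l generalizing a with
  | nil => simp [String.join]
  | cons h t ih => simp [String.join, List.foldl_cons, ih (a++h), ih h, String.append_assoc]

theorem join_snoc (l : List String) (s : String) : String.join (l ++ [s]) = String.join l ++ s := by
  rw [String.join, List.foldl_append, join_acc, join_acc]; simp [String.join]

-- A's loop with accumulator acc computes repA followed by acc
theorem encLoopA_eq (num : Int) (acc : String) : encLoopA num acc = repA num ++ acc := by
  induction num, acc using encLoopA.induct with
  | case1 n acc h ih =>
      rw [encLoopA, repA]
      simp only [h, dif_pos, dif_neg (by omega : ¬ n ≤ 0)]
      rw [ih, String.append_assoc]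
  | case2 n acc h =>
      rw [encLoopA, repA]
      simp only [h, dif_pos (by omega : n ≤ 0)]
      simp

-- MSB-recursive padM also peels one digit from the LSB end
theorem padM_snoc (k : Nat) : ∀ m : Nat, padM (k+1) m = padM k (m / 62) ++ pvDigit ((m % 62 : Nat) : Int) := by
  induction k with
  | zero =>
      intro m; simp [padM]
  | succ k ih =>
      intro m
      show pvDigit ((m / 62^(k+2) : Nat) : Int) ++ padM (k+1) (m % 62^(k+2))
        = pvDigit (((m/62) / 62^(k+1) : Nat) : Int) ++ padM k ((m/62) % 62^(k+1)) ++ pvDigit ((m % 62 : Nat) : Int)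
      rw [ih (m % 62^(k+2))]
      have h1 : m / 62 / 62^(k+1) = m / 62^(k+2) := by
        rw [Nat.div_div_eq_div_mul]; congr 1; ring
      have h2 : m % 62^(k+2) / 62 = m / 62 % 62^(k+1) := by
        have : (62:Nat)^(k+2) = 62 * 62^(k+1) := by ring
        rw [this, Nat.mod_mul_right_div_self]
      have h3 : m % 62^(k+2) % 62 = m % 62 :=
        Nat.mod_mod_of_dvd m (dvd_pow_self 62 (by omega))
      rw [h1, h2, h3, String.append_assoc]

theorem floordiv_natCast' (m k : Nat) : PySem.Int.floordiv (m : Int) (k : Int) = ((m / k : Nat) : Int) := by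
  exact_mod_cast PySem.Int.floordiv_natCast m k

theorem mod_natCast' (m k : Nat) : PySem.Int.mod (m : Int) (k : Int) = ((m % k : Nat) : Int) := by
  exact_mod_cast PySem.Int.mod_natCast m k

theorem fd62 (m : Nat) : PySem.Int.floordiv (m : Int) 62 = ((m / 62 : Nat) : Int) := by
  exact_mod_cast PySem.Int.floordiv_natCast m 62

theorem md62 (m : Nat) : PySem.Int.mod (m : Int) 62 = ((m % 62 : Nat) : Int) := by
  exact_mod_cast PySem.Int.mod_natCast m 62

theorem fd1 (m : Nat) : PySem.Int.floordiv (m : Int) 1 = ((m / 1 : Nat) : Int) := by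
  exact_mod_cast PySem.Int.floordiv_natCast m 1

theorem md1 (m : Nat) : PySem.Int.mod (m : Int) 1 = ((m % 1 : Nat) : Int) := by
  exact_mod_cast PySem.Int.mod_natCast m 1

-- repA equals the exact-width padM when m has exactly k+1 digits
theorem repA_eq_padM (k : Nat) : ∀ m : Nat, 62^k ≤ m → m < 62^(k+1) → repA (m : Int) = padM k m := by
  induction k with
  | zero =>
      intro m h1 h2
      rw [repA]
      simp only [dif_neg (by exact_mod_cast (by omega : ¬ m ≤ 0) : ¬ (m:Int) ≤ 0)]
      rw [fd62 m, md62 m,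
          Nat.div_eq_of_lt (by omega), Nat.mod_eq_of_lt (by omega)]
      rw [repA]; simp [padM]
  | succ k ih =>
      intro m h1 h2
      rw [repA]
      have hm : (62:Nat)^(k+1) ≤ m := h1
      have hpos : 0 < m := lt_of_lt_of_le (Nat.one_le_pow _ 62 (by omega)) h1
      simp only [dif_neg (by exact_mod_cast (by omega : ¬ m ≤ 0) : ¬ (m:Int) ≤ 0)]
      rw [fd62 m, md62 m]
      rw [ih (m / 62)
            (Nat.le_div_iff_mul_le (by omega) |>.mpr (by calc 62^k * 62 = 62^(k+1) := by ring
                                                           _ ≤ m := hm))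
            (Nat.div_lt_iff_lt_mul (by omega) |>.mpr (by calc m < 62^(k+2) := h2
                                                           _ = 62^(k+1) * 62 := by ring))]
      rw [padM_snoc]

-- B's digit loop started at 62^k appends the (k+1)-digit padded rendering
theorem digLoopB_eq (k : Nat) : ∀ (m : Nat) (out : List String),
    String.join (digLoopB ((62:Int)^k) (m : Int) out) = String.join out ++ padM k m := by
  induction k with
  | zero =>
      intro m out
      rw [digLoopB]
      simp only [pow_zero, dif_pos (by omega : (0:Int) < 1)]
      have hd : PySem.Int.floordiv (1:Int) 62 = 0 := by decide
      rw [hd, fd1 m, Nat.div_one, md1 m]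
      rw [digLoopB]
      simp only [dif_neg (by omega : ¬ (0:Int) < 0)]
      rw [join_snoc]; rfl
  | succ k ih =>
      intro m out
      have hc : ((62:Int)^(k+1)) = ((62^(k+1) : Nat) : Int) := by push_cast; ring
      have hpos : (0:Int) < (62:Int)^(k+1) := by positivity
      rw [digLoopB]
      simp only [dif_pos hpos]
      rw [hc, fd62 (62^(k+1)), floordiv_natCast' m (62^(k+1)), mod_natCast' m (62^(k+1))]
      have hq : (62:Nat)^(k+1) / 62 = 62^k := by
        have : (62:Nat)^(k+1) = 62^k * 62 := by ring
        rw [this, Nat.mul_div_cancel _ (by omega)]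
      rw [hq]
      have := ih (m % 62^(k+1)) (out ++ [pvDigit ((m / 62^(k+1) : Nat) : Int)])
      rw [(by push_cast; ring : ((62^k : Nat) : Int) = (62:Int)^k)] at *
      rw [this, join_snoc, String.append_assoc]
      rfl

-- B's power loop, started at any power of 62 not exceeding num, finds the largest one
theorem powLoopB_spec (num p : Int) :
    ∀ j : Nat, p = (62:Int)^j → (62:Int)^j ≤ num →
      ∃ k : Nat, powLoopB p num = (62:Int)^k ∧ (62:Int)^k ≤ num ∧ num < (62:Int)^(k+1) := by
  induction p using powLoopB.induct (num := num) with
  | case1 p h ih =>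
      intro j hp hle
      rw [powLoopB]
      simp only [dif_pos h]
      obtain ⟨k, hk⟩ := ih (j+1) (by rw [hp]; ring) (by
        calc (62:Int)^(j+1) = 62^j * 62 := by ring
          _ = p * 62 := by rw [hp]
          _ ≤ num := h.2)
      exact ⟨k, hk⟩
  | case2 p h =>
      intro j hp hle
      rw [powLoopB]
      simp only [dif_neg h]
      refine ⟨j, hp, hle, ?_⟩
      have hppos : (0:Int) < p := by rw [hp]; positivity
      have : ¬ p * 62 ≤ num := by tauto
      calc num < p * 62 := by omega
        _ = (62:Int)^(j+1) := by rw [hp]; ring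

-- ===== VERDICT (by name: the statement is the Claim_ definition above) =====
theorem encode_ref_id_spec : Claim_equal_encode_ref_id := by
  intro num _
  unfold Spec_encode_ref_id encode_ref_id encode_ref_id_alt
  rcases lt_trichotomy num 0 with hneg | hzero | hpos
  · simp only [if_neg (by omega : ¬ num = 0), if_pos (by omega : num ≤ 0)]
    rw [encLoopA, dif_neg (by omega : ¬ (0:Int) < num)]
  · subst hzero; simp
  · simp only [if_neg (by omega : ¬ num = 0), if_neg (by omega : ¬ num ≤ 0)]
    obtain ⟨k, hpow, hlo, hhi⟩ := powLoopB_spec num 1 0 (by norm_num) (by simpa using hpos)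
    have hnn : num = ((num.toNat : Nat) : Int) := by omega
    have hcast : ∀ j : Nat, ((62^j : Nat) : Int) = (62:Int)^j := by intro j; push_cast; ring
    have hlo' : 62^k ≤ num.toNat := by
      have := hlo; rw [← hcast k, hnn] at this; exact_mod_cast this
    have hhi' : num.toNat < 62^(k+1) := by
      have := hhi; rw [← hcast (k+1), hnn] at this; exact_mod_cast this
    rw [encLoopA_eq, hpow]
    rw [hnn, repA_eq_padM k num.toNat hlo' hhi', digLoopB_eq k num.toNat []]
    simp [String.join]
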